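-- pv_equiv track=rewrite | github.com/mayursavaliyams-dev/-maay-dashboard | offline_backtest_viewer.py | _pick_default_sheet
-- ===== SOURCE A (Python) =====
-- def _pick_default_sheet(sheet_names):
--     preferred_names = [
--         "All Trades",
--         "ALL DATE WISE",
--         "Trades",
--         "Market Visual",
--         "NIFTY P-L",
--         "SENSEX P-L",
--         "BANKNIFTY P-L",
--         "NIFTY",
--         "SENSEX",
--         "BANKNIFTY",
--         "Daily NIFTY",
--         "Daily SENSEX",
--         "Daily BANKNIFTY",
--         "Summary",
--     ]
--     for name in preferred_names:
--         if name in sheet_names: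
--             return name
--     return sheet_names[0]
-- ===== SOURCE B (Python) =====
-- _PRIORITY = {
--     "All Trades": 0,
--     "ALL DATE WISE": 1,
--     "Trades": 2,
--     "Market Visual": 3,
--     "NIFTY P-L": 4,
--     "SENSEX P-L": 5,
--     "BANKNIFTY P-L": 6,
--     "NIFTY": 7,
--     "SENSEX": 8,
--     "BANKNIFTY": 9,
--     "Daily NIFTY": 10,
--     "Daily SENSEX": 11,
--     "Daily BANKNIFTY": 12,
--     "Summary": 13,
-- }
--
--
-- def _pick_default_sheet(sheet_names):
--     best = None
--     for name in sheet_names: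
--         p = _PRIORITY.get(name)
--         if p is not None and (best is None or p < best[0]):
--             best = (p, name)
--     if best is not None:
--         return best[1]
--     return sheet_names[0]
-- ===== Notes on version B (the rewrite author's own statement) =====
-- stated objective: faster
-- what changed: B makes one pass over sheet_names with a precomputed name-to-priority dict, keeping the minimum-priority match, instead of A's scan over the 14 preferred names with a membership test over sheet_names for each; Pre_ excludes only the empty list, on which A raises IndexError (B raises it too).
import Mathlib
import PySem

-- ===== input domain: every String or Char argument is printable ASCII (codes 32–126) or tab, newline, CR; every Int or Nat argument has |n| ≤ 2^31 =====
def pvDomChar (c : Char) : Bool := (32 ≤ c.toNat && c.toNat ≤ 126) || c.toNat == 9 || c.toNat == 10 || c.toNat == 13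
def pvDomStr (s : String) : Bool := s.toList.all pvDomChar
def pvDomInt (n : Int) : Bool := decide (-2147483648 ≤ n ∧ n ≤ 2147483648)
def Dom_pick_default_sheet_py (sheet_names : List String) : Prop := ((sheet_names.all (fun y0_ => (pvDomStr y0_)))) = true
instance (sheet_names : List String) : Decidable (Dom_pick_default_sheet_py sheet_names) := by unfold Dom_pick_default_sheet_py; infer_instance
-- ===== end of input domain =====

-- B replaces A's scan over the fixed preference list (one membership pass over sheet_names per
-- preferred name) by a single pass over sheet_names with a priority dict, keeping the
-- minimum-priority match; same return value on every non-empty input.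

-- ===== PORT A =====
def pvPreferred : List String :=
  ["All Trades", "ALL DATE WISE", "Trades", "Market Visual", "NIFTY P-L", "SENSEX P-L",
   "BANKNIFTY P-L", "NIFTY", "SENSEX", "BANKNIFTY", "Daily NIFTY", "Daily SENSEX",
   "Daily BANKNIFTY", "Summary"]

-- A's loop: first preferred name that occurs in sheet_names
def pvALoop : List String → List String → Option String
  | [], _ => none
  | n :: rest, ss => if ss.contains n then some n else pvALoop rest ss

def pick_default_sheet_py (sheet_names : List String) : String :=
  match pvALoop pvPreferred sheet_names with
  | some n => n
  | none => (PySem.List.pyGet? sheet_names 0).getD ""   -- sheet_names[0]; Pre_ excludes the IndexError case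

-- ===== PORT B =====
-- _PRIORITY = {name: i for i, name in enumerate(_PREFERRED)}  (distinct literal keys, in order)
def pvPrioPairs : List (String × Int) :=
  [("All Trades", 0), ("ALL DATE WISE", 1), ("Trades", 2), ("Market Visual", 3),
   ("NIFTY P-L", 4), ("SENSEX P-L", 5), ("BANKNIFTY P-L", 6), ("NIFTY", 7), ("SENSEX", 8),
   ("BANKNIFTY", 9), ("Daily NIFTY", 10), ("Daily SENSEX", 11), ("Daily BANKNIFTY", 12),
   ("Summary", 13)]

def pvPriority : PySem.Dict String Int := PySem.Dict.mk pvPrioPairs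

-- B's loop: keep the (priority, name) pair with the smallest priority seen
def pvBLoop : List String → Option (Int × String) → Option (Int × String)
  | [], best => best
  | name :: rest, best =>
    match pvPriority.get? name with
    | some p =>
      match best with
      | none => pvBLoop rest (some (p, name))
      | some b => if p < b.1 then pvBLoop rest (some (p, name)) else pvBLoop rest (some b)
    | none => pvBLoop rest best

def pick_default_sheet_py_alt (sheet_names : List String) : String :=
  match pvBLoop sheet_names none with
  | some b => b.2
  | none => (PySem.List.pyGet? sheet_names 0).getD ""   -- sheet_names[0]; Pre_ excludes the IndexError case

-- ===== PRECONDITION & SPEC =====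
-- Pre_ excludes the empty list, on which the Python A raises IndexError (sheet_names[0]); B raises there too.
def Pre_pick_default_sheet_py (sheet_names : List String) : Prop := sheet_names ≠ []
instance (sheet_names : List String) : Decidable (Pre_pick_default_sheet_py sheet_names) := by
  unfold Pre_pick_default_sheet_py; infer_instance

def pvWitness_pick_default_sheet_py : List String := (["Data", "NIFTY"])

def Spec_pick_default_sheet_py (sheet_names : List String) (out : String) : Prop :=
  out = pick_default_sheet_py_alt sheet_names
instance (sheet_names : List String) (out : String) : Decidable (Spec_pick_default_sheet_py sheet_names out) := by
  unfold Spec_pick_default_sheet_py; infer_instance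

-- ===== CLAIM (what is proved, stated in full; the proofs are below) =====
def Claim_equal_pick_default_sheet_py : Prop :=
  ∀ (sheet_names : List String), Dom_pick_default_sheet_py sheet_names →
    Pre_pick_default_sheet_py sheet_names →
    Spec_pick_default_sheet_py sheet_names (pick_default_sheet_py sheet_names)

-- ===== LEMMAS AND PROOFS =====

-- first-match lookup in an association list (= Dict.get? on a literal dict)
def pvLk : List (String × Int) → String → Option Int
  | [], _ => none
  | (k, v) :: r, n => if k = n then some v else pvLk r n

theorem pvGet?_eq_lk (L : List (String × Int)) (n : String) :
    (PySem.Dict.mk L).get? n = pvLk L n := by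
  induction L with
  | nil => rfl
  | cons p r ih =>
    obtain ⟨k, v⟩ := p
    rw [PySem.Dict.get?_mk_cons, pvLk]
    by_cases h : k = n
    · simp [h]
    · simp [h, ih]

theorem pvLk_mem (L : List (String × Int)) (n : String) (i : Int)
    (h : pvLk L n = some i) : (n, i) ∈ L := by
  induction L with
  | nil => simp [pvLk] at h
  | cons p r ih =>
    obtain ⟨k, v⟩ := p
    rw [pvLk] at h
    by_cases hk : k = n
    · simp [hk] at h; simp [hk, h]
    · simp [hk] at h; exact List.mem_cons_of_mem _ (ih h)

-- A-side: if no member of ss is a key, A's loop finds nothing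
theorem pvALoop_none (L : List (String × Int)) (ss : List String)
    (h : ∀ m ∈ ss, pvLk L m = none) :
    pvALoop (L.map Prod.fst) ss = none := by
  induction L with
  | nil => rfl
  | cons p r ih =>
    obtain ⟨k, v⟩ := p
    rw [List.map_cons, pvALoop]
    have hk : ¬ ss.contains k := by
      intro hc
      have := h k (by simpa using hc)
      simp [pvLk] at this
    rw [if_neg hk]
    exact ih (fun m hm => by
      have := h m hm
      rw [pvLk] at this
      by_cases hkm : k = m
      · simp [hkm] at this
      · simpa [hkm] using this)

-- A-side: if n ∈ ss has the minimal priority among ss's keyed members, A's loop returns n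
theorem pvALoop_min (L : List (String × Int))
    (hpw : L.Pairwise (fun a b => a.2 < b.2)) (ss : List String) (n : String) (i : Int)
    (hn : n ∈ ss) (hlk : pvLk L n = some i)
    (hmin : ∀ m ∈ ss, ∀ j, pvLk L m = some j → i ≤ j) :
    pvALoop (L.map Prod.fst) ss = some n := by
  induction L with
  | nil => simp [pvLk] at hlk
  | cons p r ih =>
    obtain ⟨k, v⟩ := p
    rw [List.pairwise_cons] at hpw
    rw [List.map_cons, pvALoop]
    by_cases hk : ss.contains k
    · rw [if_pos hk]
      -- show n = k
      have hkss : k ∈ ss := by simpa using hk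
      have hiv : i ≤ v := hmin k hkss v (by simp [pvLk])
      by_cases hkn : k = n
      · simp [hkn]
      · exfalso
        rw [pvLk, if_neg hkn] at hlk
        have : v < i := hpw.1 (n, i) (pvLk_mem r n i hlk)
        omega
    · rw [if_neg hk]
      have hkn : k ≠ n := by
        intro he; exact hk (by simpa [he] using List.contains_iff_mem.mpr hn)
      apply ih hpw.2
      · rwa [pvLk, if_neg hkn] at hlk
      · intro m hm j hj
        have hkm : k ≠ m := by
          intro he; exact hk (by simpa [he] using List.contains_iff_mem.mpr hm)
        exact hmin m hm j (by rw [pvLk, if_neg hkm]; exact hj)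

-- B-side: if the scan produces nothing, no member of ss is a key (and the accumulator was empty)
theorem pvBLoop_none (ss : List String) :
    ∀ acc, pvBLoop ss acc = none → acc = none ∧ ∀ m ∈ ss, pvPriority.get? m = none := by
  induction ss with
  | nil => intro acc h; simpa [pvBLoop] using h
  | cons x r ih =>
    intro acc h
    rw [pvBLoop] at h
    cases hx : pvPriority.get? x with
    | some p =>
      cases acc with
      | none =>
        simp only [hx] at h
        exact absurd (ih _ h).1 (by simp)
      | some b =>
        simp only [hx] at h
        split at h <;> exact absurd (ih _ h).1 (by simp)
    | none =>
      rw [hx] at h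
      obtain ⟨h1, h2⟩ := ih _ h
      exact ⟨h1, fun m hm => by
        rcases List.mem_cons.mp hm with he | hr
        · rw [he]; exact hx
        · exact h2 m hr⟩

-- B-side: characterisation of a successful scan: the result is a keyed member of ss
-- (or the starting accumulator) with minimal priority
theorem pvBLoop_some (ss : List String) :
    ∀ acc i n, pvBLoop ss acc = some (i, n) →
      ((pvPriority.get? n = some i ∧ n ∈ ss) ∨ acc = some (i, n)) ∧
      (∀ m ∈ ss, ∀ j, pvPriority.get? m = some j → i ≤ j) ∧
      (∀ p q, acc = some (p, q) → i ≤ p) := by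
  induction ss with
  | nil =>
    intro acc i n h
    rw [pvBLoop] at h
    refine ⟨Or.inr h, by simp, ?_⟩
    intro p q hpq
    rw [hpq] at h
    have hpi : p = i ∧ q = n := by simpa using h
    omega
  | cons x r ih =>
    intro acc i n h
    rw [pvBLoop] at h
    cases hx : pvPriority.get? x with
    | none =>
      simp only [hx] at h
      obtain ⟨h1, h2, h3⟩ := ih _ _ _ h
      refine ⟨?_, ?_, h3⟩
      · rcases h1 with ⟨ha, hb⟩ | ha
        · exact Or.inl ⟨ha, List.mem_cons_of_mem _ hb⟩
        · exact Or.inr ha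
      · intro m hm j hj
        rcases List.mem_cons.mp hm with he | hr
        · rw [he, hx] at hj; cases hj
        · exact h2 m hr j hj
    | some p =>
      cases acc with
      | none =>
        simp only [hx] at h
        obtain ⟨h1, h2, h3⟩ := ih _ _ _ h
        refine ⟨?_, ?_, by simp⟩
        · rcases h1 with ⟨ha, hb⟩ | ha
          · exact Or.inl ⟨ha, List.mem_cons_of_mem _ hb⟩
          · have he1 : p = i ∧ x = n := by simpa using ha
            exact Or.inl ⟨by rw [← he1.2, ← he1.1]; exact hx, by simp [← he1.2]⟩
        · intro m hm j hj
          rcases List.mem_cons.mp hm with he | hr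
          · rw [he, hx] at hj
            have hjp : p = j := by simpa using hj
            have := h3 p x rfl
            omega
          · exact h2 m hr j hj
      | some b =>
        obtain ⟨bp, bq⟩ := b
        simp only [hx] at h
        by_cases hlt : p < bp
        · rw [if_pos hlt] at h
          obtain ⟨h1, h2, h3⟩ := ih _ _ _ h
          refine ⟨?_, ?_, ?_⟩
          · rcases h1 with ⟨ha, hb⟩ | ha
            · exact Or.inl ⟨ha, List.mem_cons_of_mem _ hb⟩
            · have he1 : p = i ∧ x = n := by simpa using ha
              exact Or.inl ⟨by rw [← he1.2, ← he1.1]; exact hx, by simp [← he1.2]⟩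
          · intro m hm j hj
            rcases List.mem_cons.mp hm with he | hr
            · rw [he, hx] at hj
              have hjp : p = j := by simpa using hj
              have := h3 p x rfl
              omega
            · exact h2 m hr j hj
          · intro p' q' hq
            obtain ⟨he1, -⟩ : bp = p' ∧ bq = q' := by simpa using hq
            have := h3 p x rfl
            omega
        · rw [if_neg hlt] at h
          obtain ⟨h1, h2, h3⟩ := ih _ _ _ h
          refine ⟨?_, ?_, ?_⟩
          · rcases h1 with ⟨ha, hb⟩ | ha
            · exact Or.inl ⟨ha, List.mem_cons_of_mem _ hb⟩
            · exact Or.inr ha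
          · intro m hm j hj
            rcases List.mem_cons.mp hm with he | hr
            · rw [he, hx] at hj
              have hjp : p = j := by simpa using hj
              have := h3 bp bq rfl
              omega
            · exact h2 m hr j hj
          · intro p' q' hq
            obtain ⟨he1, -⟩ : bp = p' ∧ bq = q' := by simpa using hq
            have := h3 bp bq rfl
            omega

-- pvPrioPairs has strictly increasing priorities, and its keys are pvPreferred
theorem pvPairs_pairwise : pvPrioPairs.Pairwise (fun a b => a.2 < b.2) := by decide
theorem pvPairs_keys : pvPrioPairs.map Prod.fst = pvPreferred := by rfl

-- ===== VERDICT (by name: the statement is the Claim_ definition above) =====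
theorem pick_default_sheet_py_spec : Claim_equal_pick_default_sheet_py := by
  intro ss hdom hpre
  show pick_default_sheet_py ss = pick_default_sheet_py_alt ss
  rw [pick_default_sheet_py, pick_default_sheet_py_alt]
  cases hb : pvBLoop ss none with
  | none =>
    obtain ⟨-, h2⟩ := pvBLoop_none ss none hb
    have hall : ∀ m ∈ ss, pvLk pvPrioPairs m = none := fun m hm => by
      rw [← pvGet?_eq_lk]; exact h2 m hm
    rw [← pvPairs_keys, pvALoop_none _ _ hall]
  | some b =>
    obtain ⟨i, n⟩ := b
    obtain ⟨h1, h2, -⟩ := pvBLoop_some ss none i n hb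
    rcases h1 with ⟨ha, hbm⟩ | ha
    · have hlk : pvLk pvPrioPairs n = some i := by rw [← pvGet?_eq_lk]; exact ha
      have hmin : ∀ m ∈ ss, ∀ j, pvLk pvPrioPairs m = some j → i ≤ j := fun m hm j hj =>
        h2 m hm j (by rw [pvGet?_eq_lk]; exact hj)
      rw [← pvPairs_keys, pvALoop_min pvPrioPairs pvPairs_pairwise ss n i hbm hlk hmin]
    · cases ha
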